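-- pv_equiv track=rewrite | github.com/petermd/aoc2020 | day14.py | parse_mask
-- ===== SOURCE A (Python) =====
-- def parse_mask(s):
--     mask = 0x0
--     over = 0x0
--     floating = 0x0
--     for i in range(len(s)):
--         mask <<= 1
--         over <<= 1
--         floating <<= 1
--         if s[i] == '1':
--             mask |= 0x1
--             over |= 0x1
--         elif s[i] == '0':
--             mask |= 0x0
--         elif s[i] == 'X':
--             mask |= 0x1
--             floating |= 0x1
--
--     return ~    mask, over, floating
-- ===== SOURCE B (Python) =====
-- def parse_mask(s):
--     mask_str = ''.join('1' if c in '1X' else '0' for c in s)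
--     over_str = ''.join('1' if c == '1' else '0' for c in s)
--     floating_str = ''.join('1' if c == 'X' else '0' for c in s)
--     return (~int(mask_str or '0', 2),
--             int(over_str or '0', 2),
--             int(floating_str or '0', 2))
-- ===== Notes on version B (the rewrite author's own statement) =====
-- stated objective: simpler
-- what changed: Replaces the single bit-twiddling loop maintaining three shifted accumulators by three independent per-character binary-string builds parsed with int(.,2).
import Mathlib
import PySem

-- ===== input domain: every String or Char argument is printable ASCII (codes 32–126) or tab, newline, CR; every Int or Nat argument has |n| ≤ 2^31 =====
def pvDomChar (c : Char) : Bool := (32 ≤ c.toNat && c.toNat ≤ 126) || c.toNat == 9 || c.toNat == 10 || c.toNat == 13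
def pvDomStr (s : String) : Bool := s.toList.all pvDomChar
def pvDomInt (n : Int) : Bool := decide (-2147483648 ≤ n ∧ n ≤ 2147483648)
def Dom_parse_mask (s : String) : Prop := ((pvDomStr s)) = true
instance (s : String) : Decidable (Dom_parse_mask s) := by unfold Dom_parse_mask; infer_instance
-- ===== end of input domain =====

-- B replaces A's single bit-twiddling loop by three independent binary-string builds parsed with int(.,2); objective: simpler.

-- ===== PORT A =====
-- one loop the characters; state = (mask, over, floating); `x <<= 1` is `2*x`,
-- `x |= 1` is `Int.lor x 1`, `~x` is `Int.lnot x` (exact: Python's ~ on int)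
def parse_mask (s : String) : Int × Int × Int :=
  let st := s.toList.foldl (fun (acc : Int × Int × Int) c =>
    let mask := 2 * acc.1
    let ovr := 2 * acc.2.1
    let flt := 2 * acc.2.2
    if c = '1' then (Int.lor mask 1, Int.lor ovr 1, flt)
    else if c = '0' then (Int.lor mask 0, ovr, flt)
    else if c = 'X' then (Int.lor mask 1, ovr, Int.lor flt 1)
    else (mask, ovr, flt)) (0, 0, 0)
  (Int.lnot st.1, st.2.1, st.2.2)

-- ===== PORT B =====
-- int(t or '0', 2) for a string t of '0'/'1' chars: exact, since int('0',2)=0 equals the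
-- fold over the empty list and each binary digit contributes 2*acc + digit
def pvBin (l : List Char) : Int :=
  l.foldl (fun a c => 2 * a + (if c = '1' then 1 else 0)) 0

def parse_mask_alt (s : String) : Int × Int × Int :=
  let cs := s.toList
  let maskStr := cs.map (fun c => if c = '1' ∨ c = 'X' then '1' else '0')
  let overStr := cs.map (fun c => if c = '1' then '1' else '0')
  let floatingStr := cs.map (fun c => if c = 'X' then '1' else '0')
  (Int.lnot (pvBin maskStr), pvBin overStr, pvBin floatingStr)

-- ===== PRECONDITION & SPEC =====
def Spec_parse_mask (s : String) (out : Int × Int × Int) : Prop := out = parse_mask_alt s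
instance (s : String) (out : Int × Int × Int) : Decidable (Spec_parse_mask s out) := by unfold Spec_parse_mask; infer_instance

-- ===== CLAIM (what is proved, stated in full; the proofs are below) =====
def Claim_equal_parse_mask : Prop := ∀ (s : String), Dom_parse_mask s → Spec_parse_mask s (parse_mask s)

-- ===== LEMMAS AND PROOFS =====

theorem pv_natlor_one (n : Nat) : 2*n ||| 1 = 2*n+1 := by
  have h := Nat.lor_bit false n true 0
  simpa [Nat.bit, two_mul] using h

theorem pv_intlor_one (m : Int) (h : 0 ≤ m) : Int.lor (2*m) 1 = 2*m + 1 := by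
  obtain ⟨n, rfl⟩ : ∃ k : Nat, m = (k : Int) := ⟨m.toNat, (Int.toNat_of_nonneg h).symm⟩
  have h1 : (2*(n:Int)) = ((2*n : Nat) : Int) := by push_cast; ring
  rw [h1]
  have h2 : Int.lor ((2*n : Nat) : Int) 1 = (((2*n) ||| 1 : Nat) : Int) := rfl
  rw [h2, pv_natlor_one]
  push_cast; ring

theorem pv_intlor_zero (m : Int) (h : 0 ≤ m) : Int.lor m 0 = m := by
  obtain ⟨n, rfl⟩ : ∃ k : Nat, m = (k : Int) := ⟨m.toNat, (Int.toNat_of_nonneg h).symm⟩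
  have h2 : Int.lor ((n : Nat) : Int) 0 = ((n ||| 0 : Nat) : Int) := rfl
  rw [h2]; simp

-- the loop invariant: from nonnegative accumulators, A's fold computes exactly
-- the three base-2 folds of B over the mapped digit lists
theorem pv_main (l : List Char) (m o f : Int) (hm : 0 ≤ m) (ho : 0 ≤ o) (hf : 0 ≤ f) :
    l.foldl (fun (acc : Int × Int × Int) c =>
      let mask := 2 * acc.1
      let ovr := 2 * acc.2.1
      let flt := 2 * acc.2.2
      if c = '1' then (Int.lor mask 1, Int.lor ovr 1, flt)
      else if c = '0' then (Int.lor mask 0, ovr, flt)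
      else if c = 'X' then (Int.lor mask 1, ovr, Int.lor flt 1)
      else (mask, ovr, flt)) (m, o, f)
    = ((l.map (fun c => if c = '1' ∨ c = 'X' then '1' else '0')).foldl
         (fun a c => 2 * a + (if c = '1' then 1 else 0)) m,
       (l.map (fun c => if c = '1' then '1' else '0')).foldl
         (fun a c => 2 * a + (if c = '1' then 1 else 0)) o,
       (l.map (fun c => if c = 'X' then '1' else '0')).foldl
         (fun a c => 2 * a + (if c = '1' then 1 else 0)) f) := by
  induction l generalizing m o f with
  | nil => simp
  | cons c t ih =>
    simp only [List.foldl_cons, List.map_cons]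
    by_cases h1 : c = '1'
    · subst h1
      simp only [Char.reduceEq, or_false,
        ite_true, ite_false, add_zero]
      rw [pv_intlor_one m hm, pv_intlor_one o ho]
      exact ih _ _ _ (by omega) (by omega) (by omega)
    · by_cases h0 : c = '0'
      · subst h0
        simp only [Char.reduceEq, or_false,
          ite_true, ite_false, add_zero]
        rw [pv_intlor_zero (2*m) (by omega)]
        exact ih _ _ _ (by omega) (by omega) (by omega)
      · by_cases hx : c = 'X'
        · subst hx
          simp only [Char.reduceEq, or_true,
            ite_true, ite_false, add_zero]
          rw [pv_intlor_one m hm, pv_intlor_one f hf]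
          exact ih _ _ _ (by omega) (by omega) (by omega)
        · have hno : ¬(c = '1' ∨ c = 'X') := by tauto
          simp only [if_neg h1, if_neg h0, if_neg hx, if_neg hno, Char.reduceEq,
            ite_false, add_zero]
          exact ih _ _ _ (by omega) (by omega) (by omega)

-- ===== VERDICT (by name: the statement is the Claim_ definition above) =====
theorem parse_mask_spec : Claim_equal_parse_mask := by
  intro s _
  unfold Spec_parse_mask parse_mask parse_mask_alt pvBin
  simp only []
  rw [pv_main s.toList 0 0 0 le_rfl le_rfl le_rfl]
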